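-- pv_equiv track=rewrite | github.com/kevin-v96/codesignal-arcade | Intro/39 - knapsackLight.py | solution
-- ===== SOURCE A (Python) =====
-- def solution(value1, weight1, value2, weight2, maxW):
--     #need weights and values arrays for the generic algorithm
--     wts = [weight1, weight2]
--     vals = [value1, value2]
--
--     #how many items to take
--     n = 2
--
--     dp = [0 for i in range(maxW + 1)]
--
--     #starting from 1 because first row/column has to be 0
--     for i in range(1, n + 1):
--         #iterate through weights backwards
--         for w in range(maxW, 0, -1):
--             if wts[i-1] <= w:
--                 dp[w] = max(dp[w], dp[w-wts[i-1]] + vals[i-1])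
--
--     return dp[maxW]
-- ===== SOURCE B (Python) =====
-- def solution(value1, weight1, value2, weight2, maxW):
--     # enumerate the three non-empty subsets of the two items; empty subset = 0
--     best = 0
--     for v, w in ((value1, weight1), (value2, weight2),
--                  (value1 + value2, weight1 + weight2)):
--         if w <= maxW and v > best:
--             best = v
--     return best
-- ===== Notes on version B (the rewrite author's own statement) =====
-- stated objective: faster
-- what changed: Replaces the O(maxW) dynamic-programming array with a constant-time enumeration of the four subsets of the two items, keeping the best value whose total weight fits.
-- intended difference: When the best fitting subset has positive value but leaves residual capacity 0 for a weight-<=-0 item (maxW=0 with a non-positive-weight positive-value item or pair, or weight1=0 and weight2=maxW with both values positive), A's DP never fills slot 0 and returns a smaller value, while B returns the true maximum value fitting maxW, the intended knapsack answer. — e.g. on solution(3, 0, 4, 2, 2): A returns 4, B returns 7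
import Mathlib
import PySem

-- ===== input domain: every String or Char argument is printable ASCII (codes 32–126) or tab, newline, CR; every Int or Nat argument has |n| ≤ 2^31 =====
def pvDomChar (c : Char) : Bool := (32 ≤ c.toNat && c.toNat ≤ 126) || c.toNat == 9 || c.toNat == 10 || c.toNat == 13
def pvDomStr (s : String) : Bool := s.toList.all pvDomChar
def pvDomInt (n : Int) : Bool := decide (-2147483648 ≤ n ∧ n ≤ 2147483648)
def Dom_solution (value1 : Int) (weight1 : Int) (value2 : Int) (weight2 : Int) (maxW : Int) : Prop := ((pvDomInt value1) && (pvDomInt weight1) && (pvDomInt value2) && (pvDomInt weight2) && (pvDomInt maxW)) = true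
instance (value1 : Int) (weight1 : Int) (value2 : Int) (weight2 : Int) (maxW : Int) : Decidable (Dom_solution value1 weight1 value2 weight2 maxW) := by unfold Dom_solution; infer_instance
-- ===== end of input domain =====

-- B replaces A's O(maxW) DP array with a constant-time enumeration of the four
-- subsets of the two items (objective: faster, asymptotic).

-- ===== PORT A =====
def solution (value1 : Int) (weight1 : Int) (value2 : Int) (weight2 : Int) (maxW : Int) : Int :=
  let wts : List Int := [weight1, weight2]
  let vals : List Int := [value1, value2]
  let n : Int := 2
  let dp : List Int := (PySem.List.pyRange 0 (maxW + 1) 1).map (fun _ => 0)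
  let dp := (PySem.List.pyRange 1 (n + 1) 1).foldl (fun dp i =>
    (PySem.List.pyRange maxW 0 (-1)).foldl (fun dp w =>
      if PySem.List.pyGetD wts (i - 1) 0 ≤ w then
        PySem.List.pySetD dp w (max (PySem.List.pyGetD dp w 0)
          (PySem.List.pyGetD dp (w - PySem.List.pyGetD wts (i - 1) 0) 0
            + PySem.List.pyGetD vals (i - 1) 0))
      else dp) dp) dp
  PySem.List.pyGetD dp maxW 0

-- ===== PORT B =====
def solution_alt (value1 : Int) (weight1 : Int) (value2 : Int) (weight2 : Int) (maxW : Int) : Int :=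
  [(value1, weight1), (value2, weight2), (value1 + value2, weight1 + weight2)].foldl
    (fun best vw => if vw.2 ≤ maxW ∧ best < vw.1 then vw.1 else best) 0

-- ===== PRECONDITION & SPEC =====
-- Pre_ is exactly where A returns: it excludes maxW < 0 (A raises IndexError on dp[maxW]
-- of an empty dp) and a negative weight together with maxW ≥ 1 (dp[w - weight] overflows
-- the array, IndexError).
def Pre_solution (value1 : Int) (weight1 : Int) (value2 : Int) (weight2 : Int) (maxW : Int) : Prop :=
  0 ≤ maxW ∧ (maxW = 0 ∨ (0 ≤ weight1 ∧ 0 ≤ weight2))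
instance (value1 : Int) (weight1 : Int) (value2 : Int) (weight2 : Int) (maxW : Int) : Decidable (Pre_solution value1 weight1 value2 weight2 maxW) := by unfold Pre_solution; infer_instance

def pvWitness_solution : Int × Int × Int × Int × Int := (10, 5, 6, 4, 8)

-- When the best fitting subset has positive value but exhausts the capacity with
-- residual capacity 0 for a weight-≤-0 item (maxW = 0 with a non-positive-weight
-- positive-value combination, or weight1 = 0 and weight2 = maxW with both values
-- positive), A's DP never fills slot 0 and returns a smaller value, while B returns
-- the true maximum value fitting maxW — the intended knapsack answer.
def D_solution (value1 : Int) (weight1 : Int) (value2 : Int) (weight2 : Int) (maxW : Int) : Prop :=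
  (maxW = 0 ∧ ((weight1 ≤ 0 ∧ 0 < value1) ∨ (weight2 ≤ 0 ∧ 0 < value2) ∨
               (weight1 + weight2 ≤ 0 ∧ 0 < value1 + value2))) ∨
  (1 ≤ maxW ∧ weight1 = 0 ∧ weight2 = maxW ∧ 0 < value1 ∧ 0 < value2)
instance (value1 : Int) (weight1 : Int) (value2 : Int) (weight2 : Int) (maxW : Int) : Decidable (D_solution value1 weight1 value2 weight2 maxW) := by unfold D_solution; infer_instance

def Spec_solution (value1 : Int) (weight1 : Int) (value2 : Int) (weight2 : Int) (maxW : Int) (out : Int) : Prop := ¬ D_solution value1 weight1 value2 weight2 maxW → out = solution_alt value1 weight1 value2 weight2 maxW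
instance (value1 : Int) (weight1 : Int) (value2 : Int) (weight2 : Int) (maxW : Int) (out : Int) : Decidable (Spec_solution value1 weight1 value2 weight2 maxW out) := by unfold Spec_solution; infer_instance

def pvDiffWitness_solution : Int × Int × Int × Int × Int := (3, 0, 4, 2, 2)
def pvDiffWitnessOut_solution : Int × Int := (4, 7)

-- ===== CLAIM =====
def Claim_unchanged_solution : Prop := ∀ (value1 : Int) (weight1 : Int) (value2 : Int) (weight2 : Int) (maxW : Int), Dom_solution value1 weight1 value2 weight2 maxW → Pre_solution value1 weight1 value2 weight2 maxW → Spec_solution value1 weight1 value2 weight2 maxW (solution value1 weight1 value2 weight2 maxW)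
def Claim_changed_solution : Prop := Dom_solution (pvDiffWitness_solution.1) (pvDiffWitness_solution.2.1) (pvDiffWitness_solution.2.2.1) (pvDiffWitness_solution.2.2.2.1) (pvDiffWitness_solution.2.2.2.2) ∧ Pre_solution (pvDiffWitness_solution.1) (pvDiffWitness_solution.2.1) (pvDiffWitness_solution.2.2.1) (pvDiffWitness_solution.2.2.2.1) (pvDiffWitness_solution.2.2.2.2) ∧ D_solution (pvDiffWitness_solution.1) (pvDiffWitness_solution.2.1) (pvDiffWitness_solution.2.2.1) (pvDiffWitness_solution.2.2.2.1) (pvDiffWitness_solution.2.2.2.2) ∧ solution (pvDiffWitness_solution.1) (pvDiffWitness_solution.2.1) (pvDiffWitness_solution.2.2.1) (pvDiffWitness_solution.2.2.2.1) (pvDiffWitness_solution.2.2.2.2) = pvDiffWitnessOut_solution.1 ∧ solution_alt (pvDiffWitness_solution.1) (pvDiffWitness_solution.2.1) (pvDiffWitness_solution.2.2.1) (pvDiffWitness_solution.2.2.2.1) (pvDiffWitness_solution.2.2.2.2) = pvDiffWitnessOut_solution.2 ∧ pvDiffWitnessOut_solution.1 ≠ pvDiffWitnessOut_solution.2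
def Claim_exact_solution : Prop := ∀ (value1 : Int) (weight1 : Int) (value2 : Int) (weight2 : Int) (maxW : Int), Dom_solution value1 weight1 value2 weight2 maxW → Pre_solution value1 weight1 value2 weight2 maxW → D_solution value1 weight1 value2 weight2 maxW → solution value1 weight1 value2 weight2 maxW ≠ solution_alt value1 weight1 value2 weight2 maxW

-- ===== LEMMAS AND PROOFS =====

-- A constant-0 dp array reads 0 at every index (in or out of range).
lemma pyGetD_all_zero (xs : List Int) (h : ∀ x ∈ xs, x = 0) (m : Int) :
    PySem.List.pyGetD xs m 0 = 0 := by
  unfold PySem.List.pyGetD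
  cases hg : PySem.List.pyGet? xs m with
  | none => rfl
  | some x => exact h x (PySem.List.mem_of_pyGet?_eq_some xs hg)

-- One pass of A's inner loop body.
def innerStep (wi vi : Int) (dp : List Int) (w : Int) : List Int :=
  if wi ≤ w then
    PySem.List.pySetD dp w (max (PySem.List.pyGetD dp w 0)
      (PySem.List.pyGetD dp (w - wi) 0 + vi))
  else dp

lemma length_innerStep (wi vi : Int) (dp : List Int) (w : Int) :
    (innerStep wi vi dp w).length = dp.length := by
  unfold innerStep
  split
  · exact PySem.List.length_pySetD ..
  · rfl

-- Characterisation of A's backward inner loop over range(t, 0, -1):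
-- each cell w ∈ [1, t] with wi ≤ w becomes max(dp[w], dp[w-wi] + vi), reading old values.
lemma inner_loop_getD (wi vi : Int) (hwi : 0 ≤ wi) :
    ∀ (t : Nat) (dp : List Int), t < dp.length →
    ∀ m : Int, 0 ≤ m →
    PySem.List.pyGetD ((PySem.List.pyRange (t : Int) 0 (-1)).foldl (innerStep wi vi) dp) m 0 =
      if 1 ≤ m ∧ m ≤ (t : Int) ∧ wi ≤ m then
        max (PySem.List.pyGetD dp m 0) (PySem.List.pyGetD dp (m - wi) 0 + vi)
      else PySem.List.pyGetD dp m 0 := by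
  intro t
  induction t with
  | zero =>
    intro dp _ m hm
    rw [PySem.List.pyRange_neg_one_eq_nil (by omega)]
    simp only [List.foldl_nil]
    rw [if_neg (by omega)]
  | succ t ih =>
    intro dp hlen m hm
    have hcons : PySem.List.pyRange ((t + 1 : Nat) : Int) 0 (-1)
        = ((t + 1 : Nat) : Int) :: PySem.List.pyRange (((t + 1 : Nat) : Int) - 1) 0 (-1) := by
      exact PySem.List.pyRange_neg_one_cons (by push_cast; omega)
    have hsub : (((t + 1 : Nat) : Int) - 1) = (t : Int) := by push_cast; omega
    rw [hcons, hsub, List.foldl_cons]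
    have hlen' : t < (innerStep wi vi dp ((t + 1 : Nat) : Int)).length := by
      rw [length_innerStep]; omega
    rw [ih (innerStep wi vi dp ((t + 1 : Nat) : Int)) hlen' m hm]
    -- describe reads on the once-stepped array
    have hget : ∀ k : Int, 0 ≤ k →
        PySem.List.pyGetD (innerStep wi vi dp ((t + 1 : Nat) : Int)) k 0 =
          if k = ((t + 1 : Nat) : Int) ∧ wi ≤ k then
            max (PySem.List.pyGetD dp k 0)
              (PySem.List.pyGetD dp (k - wi) 0 + vi)
          else PySem.List.pyGetD dp k 0 := by
      intro k hk
      have hk' : ((k.toNat : Nat) : Int) = k := by omega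
      unfold innerStep
      by_cases hwle : wi ≤ ((t + 1 : Nat) : Int)
      · rw [if_pos hwle, ← hk',
            PySem.List.pyGetD_pySetD_natCast dp (t + 1) k.toNat _ _ hlen]
        by_cases hk1 : k.toNat = t + 1
        · rw [if_pos hk1, if_pos (by constructor <;> omega), hk1]
        · rw [if_neg hk1, if_neg (by omega)]
      · rw [if_neg hwle, if_neg (by omega)]
    by_cases hmain : 1 ≤ m ∧ m ≤ (t : Int) ∧ wi ≤ m
    · rw [if_pos hmain, if_pos (by push_cast; omega)]
      rw [hget m hm, hget (m - wi) (by omega)]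
      rw [if_neg (by omega), if_neg (by omega)]
    · rw [if_neg hmain]
      rw [hget m hm]
      by_cases hm1 : m = ((t + 1 : Nat) : Int) ∧ wi ≤ m
      · rw [if_pos hm1, if_pos (by push_cast; omega)]
      · rw [if_neg hm1, if_neg (by push_cast at hm1 ⊢; omega)]

-- The initial dp array is all zeros.
lemma dp0_all_zero (maxW : Int) (m : Int) :
    PySem.List.pyGetD ((PySem.List.pyRange 0 (maxW + 1) 1).map (fun _ => (0 : Int))) m 0 = 0 := by
  apply pyGetD_all_zero
  intro x hx
  rcases List.mem_map.1 hx with ⟨_, _, h⟩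
  omega

lemma length_dp0 (maxW : Int) :
    ((PySem.List.pyRange 0 (maxW + 1) 1).map (fun _ => (0 : Int))).length = (maxW + 1).toNat := by
  rw [List.length_map, PySem.List.length_pyRange_one]
  omega

-- Closed form of A's result under the precondition.
lemma solution_closed_form (value1 weight1 value2 weight2 maxW : Int)
    (h1 : 0 ≤ weight1) (h2 : 0 ≤ weight2) (hW : 0 ≤ maxW) :
    solution value1 weight1 value2 weight2 maxW =
      (if 1 ≤ maxW ∧ weight2 ≤ maxW then
        max (if 1 ≤ maxW ∧ weight1 ≤ maxW then max 0 (0 + value1) else 0)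
            ((if 1 ≤ maxW - weight2 ∧ weight1 ≤ maxW - weight2 then max 0 (0 + value1) else 0) + value2)
      else (if 1 ≤ maxW ∧ weight1 ≤ maxW then max 0 (0 + value1) else 0)) := by
  -- A's two outer iterations (i = 1, 2) are two innerStep passes, by definitional unfolding
  show PySem.List.pyGetD
      ((PySem.List.pyRange maxW 0 (-1)).foldl (innerStep weight2 value2)
        ((PySem.List.pyRange maxW 0 (-1)).foldl (innerStep weight1 value1)
          ((PySem.List.pyRange 0 (maxW + 1) 1).map (fun _ => 0)))) maxW 0 = _
  set dp0 : List Int := (PySem.List.pyRange 0 (maxW + 1) 1).map (fun _ => 0) with hdp0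
  have hlen0 : dp0.length = (maxW + 1).toNat := length_dp0 maxW
  have htn : ((maxW.toNat : Nat) : Int) = maxW := by omega
  have hlt : maxW.toNat < dp0.length := by omega
  set dp1 : List Int := (PySem.List.pyRange maxW 0 (-1)).foldl (innerStep weight1 value1) dp0 with hdp1
  have hdp1' : dp1 = (PySem.List.pyRange ((maxW.toNat : Nat) : Int) 0 (-1)).foldl (innerStep weight1 value1) dp0 := by
    rw [hdp1, htn]
  have g1 : ∀ m : Int, 0 ≤ m → PySem.List.pyGetD dp1 m 0 =
      if 1 ≤ m ∧ m ≤ maxW ∧ weight1 ≤ m then max 0 (0 + value1) else 0 := by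
    intro m hm
    rw [hdp1', inner_loop_getD weight1 value1 h1 maxW.toNat dp0 hlt m hm, htn]
    simp only [hdp0, dp0_all_zero]
  have hlen1 : dp1.length = dp0.length := by
    rw [hdp1]
    have : ∀ (l : List Int) (dp : List Int),
        (l.foldl (innerStep weight1 value1) dp).length = dp.length := by
      intro l
      induction l with
      | nil => intro dp; rfl
      | cons x xs ih => intro dp; rw [List.foldl_cons, ih, length_innerStep]
    exact this _ _
  have hlt1 : maxW.toNat < dp1.length := by omega
  rw [show (PySem.List.pyRange maxW 0 (-1)).foldl (innerStep weight2 value2) dp1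
        = (PySem.List.pyRange ((maxW.toNat : Nat) : Int) 0 (-1)).foldl (innerStep weight2 value2) dp1 by rw [htn]]
  rw [inner_loop_getD weight2 value2 h2 maxW.toNat dp1 hlt1 maxW hW, htn]
  by_cases hc : 1 ≤ maxW ∧ maxW ≤ maxW ∧ weight2 ≤ maxW
  · rw [if_pos hc, if_pos ⟨hc.1, hc.2.2⟩]
    rw [g1 maxW hW, g1 (maxW - weight2) (by omega)]
    by_cases ha : 1 ≤ maxW ∧ weight1 ≤ maxW
    · rw [if_pos (by omega), if_pos ha]
      by_cases hb : 1 ≤ maxW - weight2 ∧ weight1 ≤ maxW - weight2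
      · rw [if_pos (by omega), if_pos hb]
      · rw [if_neg (by omega), if_neg hb]
    · rw [if_neg (by omega), if_neg ha]
      by_cases hb : 1 ≤ maxW - weight2 ∧ weight1 ≤ maxW - weight2
      · rw [if_pos (by omega), if_pos hb]
      · rw [if_neg (by omega), if_neg hb]
  · rw [if_neg hc, if_neg (by omega)]
    rw [g1 maxW hW]
    by_cases ha : 1 ≤ maxW ∧ weight1 ≤ maxW
    · rw [if_pos (by omega), if_pos ha]
    · rw [if_neg (by omega), if_neg ha]

-- Closed form of B's subset enumeration.
lemma solution_alt_closed_form (value1 weight1 value2 weight2 maxW : Int) :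
    solution_alt value1 weight1 value2 weight2 maxW =
      (let b1 : Int := if weight1 ≤ maxW ∧ 0 < value1 then value1 else 0
       let b2 : Int := if weight2 ≤ maxW ∧ b1 < value2 then value2 else b1
       if weight1 + weight2 ≤ maxW ∧ b2 < value1 + value2 then value1 + value2 else b2) := by
  unfold solution_alt
  simp only [List.foldl_cons, List.foldl_nil]

-- With capacity 0 both inner loops are empty, so A returns dp[0] = 0.
lemma solution_zero (value1 weight1 value2 weight2 : Int) :
    solution value1 weight1 value2 weight2 0 = 0 := rfl

-- ===== VERDICT =====
theorem solution_spec : Claim_unchanged_solution := by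
  intro value1 weight1 value2 weight2 maxW _ hpre hD
  obtain ⟨hW, hcase⟩ := hpre
  unfold D_solution at hD
  by_cases h0 : maxW = 0
  · subst h0
    rw [solution_zero, solution_alt_closed_form]
    simp only []
    split_ifs <;> omega
  · obtain ⟨h1, h2⟩ : 0 ≤ weight1 ∧ 0 ≤ weight2 := by tauto
    rw [solution_closed_form value1 weight1 value2 weight2 maxW h1 h2 hW,
        solution_alt_closed_form]
    simp only []
    split_ifs <;> omega

theorem solution_changed : Claim_changed_solution := by
  unfold Claim_changed_solution; decide

theorem solution_tight : Claim_exact_solution := by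
  intro value1 weight1 value2 weight2 maxW _ hpre hD
  obtain ⟨hW, hcase⟩ := hpre
  unfold D_solution at hD
  by_cases h0 : maxW = 0
  · subst h0
    rw [solution_zero, solution_alt_closed_form]
    simp only []
    split_ifs <;> omega
  · obtain ⟨h1, h2⟩ : 0 ≤ weight1 ∧ 0 ≤ weight2 := by tauto
    rw [solution_closed_form value1 weight1 value2 weight2 maxW h1 h2 hW,
        solution_alt_closed_form]
    simp only []
    split_ifs <;> omega
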